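-- pv_equiv track=rewrite | github.com/collinsakenga/codewars_solutions | 5 kyu/5 kyu_Land perimeter.py | land_perimeter
-- ===== SOURCE A (Python) =====
-- def land_perimeter(arr):
--     total = 0
--     for i in range(len(arr)):
--         for j in range(len(arr[i])):
--             if arr[i][j] == "O":
--                 continue
--             count = 4
--             if (i-1) >= 0:
--                 if arr[i-1][j] == "X":
--                     count -= 1
--             if (j-1) >= 0:
--                 if arr[i][j-1] == "X":
--                     count -= 1
--             if (i+1) < len(arr):
--                 if arr[i+1][j] == "X":
--                     count -= 1
--             if (j+1) < len(arr[i]):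
--                 if arr[i][j+1] == "X":
--                     count -= 1
--             total += count
--     return f"Total land perimeter: {total}"
-- ===== SOURCE B (Python) =====
-- def land_perimeter(arr):
--     # Perimeter = number of exposed sides: a land cell (anything but 'O')
--     # exposes a side unless the neighbour on that side is land ('X').
--     def exposed(cells, nbrs):
--         return sum(c != 'O' and n != 'X' for c, n in zip(cells, nbrs))
--     total = 0
--     for row, above, below in zip(arr, [''] + arr, arr[1:] + ['']):
--         total += exposed(row, 'O' + row)                      # left sides
--         total += exposed(row, row[1:] + 'O')                  # right sides
--         total += exposed(row, above.ljust(len(row), 'O'))     # top sides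
--         total += exposed(row, below.ljust(len(row), 'O'))     # bottom sides
--     return f"Total land perimeter: {total}"
-- ===== Notes on version B (the rewrite author's own statement) =====
-- stated objective: simpler
-- what changed: Replaces A's per-cell 4-minus-covered-neighbours scan with absolute-index guards by positive counting of exposed sides: one helper counts, over a row zipped with a shifted/padded neighbour sequence, the land cells whose neighbour on that side is not 'X'; four such passes (left/right/top/bottom) with water-padded boundaries, no index arithmetic at all; Pre_ excludes only jagged grids on which A raises IndexError.
import Mathlib
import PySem

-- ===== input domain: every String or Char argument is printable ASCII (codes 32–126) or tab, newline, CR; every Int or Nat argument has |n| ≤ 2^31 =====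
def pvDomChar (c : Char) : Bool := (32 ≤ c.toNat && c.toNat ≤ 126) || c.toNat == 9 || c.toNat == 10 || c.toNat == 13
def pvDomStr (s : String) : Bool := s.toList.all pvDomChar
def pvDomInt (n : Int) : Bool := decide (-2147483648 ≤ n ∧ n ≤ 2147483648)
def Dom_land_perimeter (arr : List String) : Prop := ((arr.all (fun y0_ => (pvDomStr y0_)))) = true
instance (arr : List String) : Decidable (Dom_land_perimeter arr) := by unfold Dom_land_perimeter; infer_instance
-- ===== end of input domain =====

-- B counts exposed sides positively (four zip passes over shifted/water-padded
-- neighbour sequences) instead of A's per-cell 4-minus-neighbours scan with index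
-- guards; equivalence of RETURN values is proved on Pre_ (A raises outside it).


-- ===== PORT A =====
-- arr[i] as a list of chars (every access A makes is in range inside Pre_)
def rowA (arr : List String) (i : Nat) : List Char := (arr.getD i "").toList
-- arr[i][j]
def cA (arr : List String) (i j : Nat) : Char := (rowA arr i).getD j ' '

def land_perimeter (arr : List String) : String :=
  let total : Int :=
    (List.range arr.length).foldl (fun total i =>
      (List.range (rowA arr i).length).foldl (fun total j =>
        if cA arr i j = 'O' then total
        else
          let count : Int := 4
          let count := if 1 ≤ i then (if cA arr (i-1) j = 'X' then count - 1 else count) else count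
          let count := if 1 ≤ j then (if cA arr i (j-1) = 'X' then count - 1 else count) else count
          let count := if i+1 < arr.length then (if cA arr (i+1) j = 'X' then count - 1 else count) else count
          let count := if j+1 < (rowA arr i).length then (if cA arr i (j+1) = 'X' then count - 1 else count) else count
          total + count) total) 0
  "Total land perimeter: " ++ PySem.Int.toStr total

-- ===== PORT B =====
-- s.ljust(n, 'O') on char lists
def ljustO (l : List Char) (n : Nat) : List Char := l ++ List.replicate (n - l.length) 'O'

-- sum(c != 'O' and n != 'X' for c, n in zip(cells, nbrs))
def exposedB (cells nbrs : List Char) : Int :=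
  (cells.zip nbrs).foldl (fun a p => a + (if p.1 ≠ 'O' ∧ p.2 ≠ 'X' then 1 else 0)) 0

-- for row, above, below in zip(arr, [''] + arr, arr[1:] + ['']): …
def land_perimeter_alt (arr : List String) : String :=
  let total : Int :=
    (arr.zip (("" :: arr).zip (arr.tail ++ [""]))).foldl
      (fun total p =>
        let row := p.1.toList
        let above := p.2.1.toList
        let below := p.2.2.toList
        total + exposedB row ('O' :: row)
              + exposedB row (row.tail ++ ['O'])
              + exposedB row (ljustO above row.length)
              + exposedB row (ljustO below row.length)) 0
  "Total land perimeter: " ++ PySem.Int.toStr total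

-- ===== PRECONDITION & SPEC =====
-- Pre_ excludes exactly the inputs where Python A raises IndexError: a land cell whose
-- column index is out of range of the row above or below it (jagged grids).
def Pre_land_perimeter (arr : List String) : Prop :=
  ∀ i ∈ List.range arr.length, ∀ j ∈ List.range (rowA arr i).length,
    cA arr i j ≠ 'O' →
      (1 ≤ i → j < (rowA arr (i-1)).length) ∧ (i+1 < arr.length → j < (rowA arr (i+1)).length)
instance (arr : List String) : Decidable (Pre_land_perimeter arr) := by
  unfold Pre_land_perimeter; infer_instance

def pvWitness_land_perimeter : List String := ["XX", "XO"]

def Spec_land_perimeter (arr : List String) (out : String) : Prop := out = land_perimeter_alt arr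
instance (arr : List String) (out : String) : Decidable (Spec_land_perimeter arr out) := by
  unfold Spec_land_perimeter; infer_instance

-- ===== CLAIM (what is proved, stated in full; the proofs are below) =====
def Claim_equal_land_perimeter : Prop :=
  ∀ (arr : List String), Dom_land_perimeter arr → Pre_land_perimeter arr →
    Spec_land_perimeter arr (land_perimeter arr)

-- ===== LEMMAS AND PROOFS =====

-- sum of f over indices 0..m-1
def sumIdx (m : Nat) (f : Nat → Int) : Int := ((List.range m).map f).sum

-- A's per-cell contribution (the port's inner-loop let-chain, as a function)
def cellT (arr : List String) (i j : Nat) : Int :=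
  if cA arr i j = 'O' then 0
  else
    let count : Int := 4
    let count := if 1 ≤ i then (if cA arr (i-1) j = 'X' then count - 1 else count) else count
    let count := if 1 ≤ j then (if cA arr i (j-1) = 'X' then count - 1 else count) else count
    let count := if i+1 < arr.length then (if cA arr (i+1) j = 'X' then count - 1 else count) else count
    let count := if j+1 < (rowA arr i).length then (if cA arr i (j+1) = 'X' then count - 1 else count) else count
    count

lemma sumIdx_congr {m : Nat} {f g : Nat → Int} (h : ∀ j, j < m → f j = g j) :
    sumIdx m f = sumIdx m g := by
  unfold sumIdx
  rw [List.map_congr_left (fun j hj => h j (List.mem_range.mp hj))]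

lemma sum_map_add {α : Type} (l : List α) (f g : α → Int) :
    (l.map (fun x => f x + g x)).sum = (l.map f).sum + (l.map g).sum := by
  induction l with
  | nil => simp
  | cons a t ih => simp [ih]; ring

lemma sumIdx_add (m : Nat) (f g : Nat → Int) :
    sumIdx m (fun j => f j + g j) = sumIdx m f + sumIdx m g := by
  unfold sumIdx; exact sum_map_add _ f g

lemma sumIdx_succ_first (m : Nat) (f : Nat → Int) :
    sumIdx (m+1) f = f 0 + sumIdx m (fun j => f (j+1)) := by
  simp [sumIdx, List.range_succ_eq_map, List.map_map, Function.comp_def]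

lemma sumIdx_zip {α : Type} (u v : List α) (d : α) (F : α → α → Int) :
    sumIdx (min u.length v.length) (fun j => F (u.getD j d) (v.getD j d)) =
      ((u.zip v).map (fun p => F p.1 p.2)).sum := by
  induction u generalizing v with
  | nil => simp [sumIdx]
  | cons a t ih =>
      cases v with
      | nil => simp [sumIdx]
      | cons b w =>
          have hmin : min (a :: t).length (b :: w).length = min t.length w.length + 1 := by
            simp [Nat.succ_min_succ]
          rw [hmin, sumIdx_succ_first]
          simp only [List.getD_cons_succ, List.getD_cons_zero, List.zip_cons_cons,
            List.map_cons, List.sum_cons, ih]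

lemma sumIdx_zip3 {α : Type} (xs us vs : List α) (d : α) (F : α → α → α → Int) :
    sumIdx (min xs.length (min us.length vs.length))
        (fun i => F (xs.getD i d) (us.getD i d) (vs.getD i d)) =
      ((xs.zip (us.zip vs)).map (fun p => F p.1 p.2.1 p.2.2)).sum := by
  induction xs generalizing us vs with
  | nil => simp [sumIdx]
  | cons a t ih =>
      cases us with
      | nil => simp [sumIdx]
      | cons b u =>
          cases vs with
          | nil => simp [sumIdx]
          | cons c v =>
              have hmin : min (a :: t).length (min (b :: u).length (c :: v).length) =
                  min t.length (min u.length v.length) + 1 := by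
                simp [Nat.succ_min_succ]
              rw [hmin, sumIdx_succ_first]
              simp only [List.getD_cons_succ, List.getD_cons_zero, List.zip_cons_cons,
                List.map_cons, List.sum_cons, ih]

lemma getD_tail {α : Type} (r : List α) (j : Nat) (d : α) :
    r.tail.getD j d = r.getD (j+1) d := by
  cases r <;> simp

lemma guard_sub (count : Int) (P Q : Prop) [Decidable P] [Decidable Q] :
    (if P then (if Q then count - 1 else count) else count) = count - (if P ∧ Q then 1 else 0) := by
  by_cases hp : P <;> by_cases hq : Q <;> simp [hp, hq]

lemma guard_ind (P Q : Prop) [Decidable P] [Decidable Q] :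
    (if P then (if Q then (1:Int) else 0) else 0) = (if P ∧ Q then 1 else 0) := by
  by_cases hp : P <;> by_cases hq : Q <;> simp [hp, hq]

lemma cellT_eq' (arr : List String) (i j : Nat) :
    cellT arr i j =
      (if cA arr i j ≠ 'O' then (4:Int) else 0)
      + (-(if cA arr i j ≠ 'O' ∧ 1 ≤ j ∧ cA arr i (j-1) = 'X' then (1:Int) else 0)
      + (-(if cA arr i j ≠ 'O' ∧ j+1 < (rowA arr i).length ∧ cA arr i (j+1) = 'X' then (1:Int) else 0)
      + (-(if 1 ≤ i then (if cA arr i j ≠ 'O' ∧ cA arr (i-1) j = 'X' then (1:Int) else 0) else 0)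
      + (-(if i+1 < arr.length then (if cA arr i j ≠ 'O' ∧ cA arr (i+1) j = 'X' then (1:Int) else 0) else 0))))) := by
  by_cases hc : cA arr i j = 'O'
  · simp [cellT, hc]
  · simp only [cellT, if_neg hc]
    simp only [guard_sub]
    simp only [hc, ne_eq, not_false_eq_true, true_and, guard_ind, if_true]
    ring

-- total of A as a double sum of per-cell contributions
lemma A_total (arr : List String) :
    land_perimeter arr =
      "Total land perimeter: " ++ PySem.Int.toStr
        (sumIdx arr.length (fun i => sumIdx (rowA arr i).length (cellT arr i))) := by
  unfold land_perimeter
  show "Total land perimeter: " ++ PySem.Int.toStr _ = _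
  refine congrArg (fun z => "Total land perimeter: " ++ PySem.Int.toStr z) ?_
  rw [List.foldl_ext _ (fun (total : Int) i => total + sumIdx (rowA arr i).length (cellT arr i)) 0
      (fun t i _ => ?_)]
  · rw [PySem.List.foldl_add, zero_add]
    rfl
  · rw [List.foldl_ext _ (fun (total : Int) j => total + cellT arr i j) t
        (fun t' j _ => ?_)]
    · rw [PySem.List.foldl_add]
      rfl
    · by_cases hc : cA arr i j = 'O'
      · rw [if_pos hc]
        simp only [cellT]
        rw [if_pos hc]
        exact (add_zero t').symm
      · rw [if_neg hc]
        simp only [cellT]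
        rw [if_neg hc]

-- B's indicator
def indB (c n : Char) : Int := if c ≠ 'O' ∧ n ≠ 'X' then 1 else 0

lemma exposedB_eq (cells nbrs : List Char) (h : cells.length ≤ nbrs.length) :
    exposedB cells nbrs =
      sumIdx cells.length (fun j => indB (cells.getD j ' ') (nbrs.getD j ' ')) := by
  unfold exposedB
  rw [PySem.List.foldl_add, zero_add]
  simp only [indB]
  rw [← sumIdx_zip cells nbrs ' ' (fun c n => if c ≠ 'O' ∧ n ≠ 'X' then (1:Int) else 0),
    min_eq_left h]

-- B's per-row contribution, indexed
def rowB (arr : List String) (i : Nat) : Int :=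
  exposedB (rowA arr i) ('O' :: rowA arr i)
  + exposedB (rowA arr i) ((rowA arr i).tail ++ ['O'])
  + exposedB (rowA arr i) (ljustO ((("" :: arr).getD i "").toList) (rowA arr i).length)
  + exposedB (rowA arr i) (ljustO (((arr.tail ++ [""]).getD i "").toList) (rowA arr i).length)

-- total of B as an indexed sum of row contributions
lemma B_total (arr : List String) :
    land_perimeter_alt arr =
      "Total land perimeter: " ++ PySem.Int.toStr (sumIdx arr.length (fun i => rowB arr i)) := by
  unfold land_perimeter_alt
  show "Total land perimeter: " ++ PySem.Int.toStr _ = _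
  refine congrArg (fun z => "Total land perimeter: " ++ PySem.Int.toStr z) ?_
  have hF : ∀ (t : Int) (p : String × (String × String)),
      (fun (total : Int) (p : String × (String × String)) =>
        let row := p.1.toList
        let above := p.2.1.toList
        let below := p.2.2.toList
        total + exposedB row ('O' :: row)
              + exposedB row (row.tail ++ ['O'])
              + exposedB row (ljustO above row.length)
              + exposedB row (ljustO below row.length)) t p =
      t + (exposedB p.1.toList ('O' :: p.1.toList)
            + exposedB p.1.toList (p.1.toList.tail ++ ['O'])
            + exposedB p.1.toList (ljustO p.2.1.toList p.1.toList.length)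
            + exposedB p.1.toList (ljustO p.2.2.toList p.1.toList.length)) := by
    intro t p; dsimp only; ring
  rw [List.foldl_ext _ _ 0 (fun t p _ => hF t p), PySem.List.foldl_add, zero_add]
  rw [← sumIdx_zip3 arr ("" :: arr) (arr.tail ++ [""]) ""
        (fun r a b => exposedB r.toList ('O' :: r.toList)
            + exposedB r.toList (r.toList.tail ++ ['O'])
            + exposedB r.toList (ljustO a.toList r.toList.length)
            + exposedB r.toList (ljustO b.toList r.toList.length))]
  have hlen : min arr.length (min ("" :: arr).length ((arr.tail ++ [""]).length)) = arr.length := by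
    cases arr <;> simp
  rw [hlen]
  rfl

-- neighbour characters seen by B, resolved against A's guarded accesses
lemma nbr_left (r : List Char) (j : Nat) :
    ('O' :: r).getD j ' ' = if 1 ≤ j then r.getD (j-1) ' ' else 'O' := by
  cases j <;> simp

lemma nbr_right (r : List Char) (j : Nat) (h : j < r.length) :
    (r.tail ++ ['O']).getD j ' ' = if j + 1 < r.length then r.getD (j+1) ' ' else 'O' := by
  by_cases hb : j + 1 < r.length
  · have hj : j < r.tail.length := by simp [List.length_tail]; omega
    rw [if_pos hb, List.getD_append _ _ _ _ hj, getD_tail]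
  · have hj : j = r.length - 1 := by omega
    have hlen : r.tail.length = r.length - 1 := by simp [List.length_tail]
    rw [if_neg hb, List.getD_append_right _ _ _ _ (by omega : r.tail.length ≤ j)]
    rw [hlen]
    have : j - (r.length - 1) = 0 := by omega
    rw [this]
    rfl

lemma nbr_ljust (a r : List Char) (j : Nat) (h : j < r.length) :
    (ljustO a r.length).getD j ' ' = if j < a.length then a.getD j ' ' else 'O' := by
  unfold ljustO
  by_cases hj : j < a.length
  · rw [if_pos hj, List.getD_append _ _ _ _ hj]
  · rw [if_neg hj, List.getD_append_right _ _ _ _ (by omega : a.length ≤ j)]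
    have : j - a.length < r.length - a.length := by omega
    simp [this]

lemma above_resolve (arr : List String) (i : Nat) :
    (("" :: arr).getD i "").toList = if 1 ≤ i then rowA arr (i-1) else [] := by
  cases i <;> simp [rowA]

lemma below_resolve (arr : List String) (i : Nat) (h : i < arr.length) :
    ((arr.tail ++ [""]).getD i "").toList =
      if i + 1 < arr.length then rowA arr (i+1) else [] := by
  by_cases hb : i + 1 < arr.length
  · have hj : i < arr.tail.length := by simp [List.length_tail]; omega
    rw [if_pos hb, List.getD_append _ _ _ _ hj]
    simp [rowA]
  · have hlen : arr.tail.length = arr.length - 1 := by simp [List.length_tail]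
    rw [if_neg hb, List.getD_append_right _ _ _ _ (by omega : arr.tail.length ≤ i)]
    rw [hlen]
    have : i - (arr.length - 1) = 0 := by omega
    rw [this]
    rfl

lemma ind_compl (c x : Prop) [Decidable c] [Decidable x] :
    (if c ∧ ¬ x then (1:Int) else 0) = (if c then 1 else 0) - (if c ∧ x then 1 else 0) := by
  by_cases hc : c <;> by_cases hx : x <;> simp [hc, hx]

-- the per-cell equality: B's four exposure indicators sum to A's cell count
lemma cell_eq (arr : List String) (i j : Nat) (hi : i < arr.length)
    (hj : j < (rowA arr i).length) :
    cellT arr i j =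
      indB (cA arr i j) (('O' :: rowA arr i).getD j ' ')
      + indB (cA arr i j) (((rowA arr i).tail ++ ['O']).getD j ' ')
      + indB (cA arr i j) ((ljustO ((("" :: arr).getD i "").toList) (rowA arr i).length).getD j ' ')
      + indB (cA arr i j) ((ljustO (((arr.tail ++ [""]).getD i "").toList) (rowA arr i).length).getD j ' ') := by
  have hX : ' ' ≠ 'X' := by decide
  have hO : 'O' ≠ 'X' := by decide
  -- resolve each neighbour character as an 'X'-test
  have eL : (('O' :: rowA arr i).getD j ' ' = 'X') ↔ (1 ≤ j ∧ cA arr i (j-1) = 'X') := by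
    rw [nbr_left]
    by_cases h1 : 1 ≤ j <;> simp [h1, cA, hO]
  have eR : ((((rowA arr i).tail ++ ['O']).getD j ' ') = 'X') ↔
      (j+1 < (rowA arr i).length ∧ cA arr i (j+1) = 'X') := by
    rw [nbr_right _ _ hj]
    by_cases h1 : j+1 < (rowA arr i).length <;> simp [h1, cA, hO]
  have eU : (((ljustO ((("" :: arr).getD i "").toList) (rowA arr i).length).getD j ' ') = 'X') ↔
      (1 ≤ i ∧ cA arr (i-1) j = 'X') := by
    rw [above_resolve]
    by_cases h1 : 1 ≤ i
    · rw [if_pos h1, nbr_ljust _ _ _ hj]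
      by_cases h2 : j < (rowA arr (i-1)).length
      · simp [h2, h1, cA]
      · rw [if_neg h2]
        simp only [cA]
        rw [List.getD_eq_default _ _ (by omega : (rowA arr (i-1)).length ≤ j)]
        simp [h1, hX, hO]
    · rw [if_neg h1, nbr_ljust _ _ _ hj]
      simp [h1, hO]
  have eD : (((ljustO (((arr.tail ++ [""]).getD i "").toList) (rowA arr i).length).getD j ' ') = 'X') ↔
      (i+1 < arr.length ∧ cA arr (i+1) j = 'X') := by
    rw [below_resolve _ _ hi]
    by_cases h1 : i+1 < arr.length
    · rw [if_pos h1, nbr_ljust _ _ _ hj]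
      by_cases h2 : j < (rowA arr (i+1)).length
      · simp [h2, h1, cA]
      · rw [if_neg h2]
        simp only [cA]
        rw [List.getD_eq_default _ _ (by omega : (rowA arr (i+1)).length ≤ j)]
        simp [h1, hX, hO]
    · rw [if_neg h1, nbr_ljust _ _ _ hj]
      simp [h1, hO]
  unfold indB
  rw [cellT_eq', guard_ind, guard_ind, ind_compl, ind_compl, ind_compl, ind_compl]
  simp only [eL, eR, eU, eD]
  by_cases hc : cA arr i j = 'O'
  · simp [hc]
  · simp only [hc, ne_eq, not_false_iff, true_and, if_true]
    ring

-- ===== VERDICT (by name: the statement is the Claim_ definition above) =====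
-- per-row equality, then fold
lemma row_eq (arr : List String) (i : Nat) (hi : i < arr.length) :
    sumIdx (rowA arr i).length (cellT arr i) = rowB arr i := by
  have hL : (rowA arr i).length ≤ ('O' :: rowA arr i).length := by simp
  have hR : (rowA arr i).length ≤ ((rowA arr i).tail ++ ['O']).length := by
    simp [List.length_tail]; omega
  have hU : (rowA arr i).length ≤ (ljustO ((("" :: arr).getD i "").toList) (rowA arr i).length).length := by
    simp [ljustO]; omega
  have hD : (rowA arr i).length ≤ (ljustO (((arr.tail ++ [""]).getD i "").toList) (rowA arr i).length).length := by
    simp [ljustO]; omega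
  unfold rowB
  rw [exposedB_eq _ _ hL, exposedB_eq _ _ hR, exposedB_eq _ _ hU, exposedB_eq _ _ hD,
    ← sumIdx_add, ← sumIdx_add, ← sumIdx_add]
  exact sumIdx_congr (fun j hj => cell_eq arr i j hi hj)

theorem land_perimeter_spec : Claim_equal_land_perimeter := by
  intro arr _ _
  unfold Spec_land_perimeter
  rw [A_total, B_total]
  refine congrArg (fun z => "Total land perimeter: " ++ PySem.Int.toStr z) ?_
  exact sumIdx_congr (fun i hi => row_eq arr i hi)
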